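-- pv_equiv track=rewrite | github.com/Isfireomat/Math_work | chart_defs.py | get_group_point
-- ===== SOURCE A (Python) =====
-- def get_group_point(masiv,group):
--     d={}
--     for y in range(int(min(masiv)),int(max(masiv))-group+2):
--         n=0
--         for y2 in range(y,y+group):
--             if y2 in masiv:
--                 n+=masiv.count(y2)
--         if n in d.keys(): d[n].append(f"{y}-{y+group-1}")
--         else: d[n]=[f"{y}-{y+group-1}"]
--     return max(d.keys()),d[max(d.keys())]
-- ===== SOURCE B (Python) =====
-- def get_group_point(masiv, group):
--     # Occurrence counts once, then a sliding-window running sum over the integer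
--     # range, keeping the best windows on the fly (no dict of all counts).
--     cnt = {}
--     for v in masiv:
--         cnt[v] = cnt.get(v, 0) + 1
--     lo, hi = min(masiv), max(masiv)
--     w = max(group, 0)
--     # prime the window one position left of lo, then slide right
--     n = 0
--     for v in range(lo - 1, lo - 1 + w):
--         n += cnt.get(v, 0)
--     best, wins = None, []
--     for y in range(lo, hi - group + 2):
--         n += cnt.get(y + w - 1, 0) - cnt.get(y - 1, 0)
--         if best is None or n > best:
--             best, wins = n, [f"{y}-{y+group-1}"]
--         elif n == best:
--             wins.append(f"{y}-{y+group-1}")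
--     return best, wins
-- ===== Notes on version B (the rewrite author's own statement) =====
-- stated objective: faster
-- what changed: Replaces the per-window rescan of the list (membership test plus list.count for every integer in every window, grouped in a dict keyed by count) with a hash map of occurrence counts built once and a sliding-window running sum over the integer range, keeping the best windows on the fly.
import Mathlib
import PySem

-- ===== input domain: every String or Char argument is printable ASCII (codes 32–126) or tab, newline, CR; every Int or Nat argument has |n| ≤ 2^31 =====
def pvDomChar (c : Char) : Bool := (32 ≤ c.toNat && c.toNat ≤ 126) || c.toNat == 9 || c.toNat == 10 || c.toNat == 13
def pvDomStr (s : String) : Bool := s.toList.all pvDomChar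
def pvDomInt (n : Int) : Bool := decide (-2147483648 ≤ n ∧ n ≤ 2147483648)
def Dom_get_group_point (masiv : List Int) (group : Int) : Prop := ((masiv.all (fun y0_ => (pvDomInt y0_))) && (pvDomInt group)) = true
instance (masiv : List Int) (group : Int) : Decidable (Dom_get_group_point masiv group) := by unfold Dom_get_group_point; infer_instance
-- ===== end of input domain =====

-- B replaces A's per-window rescans of the list with a counter built once plus a
-- sliding-window running sum (objective: faster, asymptotically).

-- ===== PORT A =====
-- f"{y}-{y+group-1}"
def aLabel (group y : Int) : String :=
  PySem.Int.toStr y ++ "-" ++ PySem.Int.toStr (y + group - 1)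

-- A's inner loop: 'for y2 in range(y, y+group): if y2 in masiv: n += masiv.count(y2)'
def aInner (masiv : List Int) (group y : Int) : Int :=
  (PySem.List.pyRange y (y + group) 1).foldl
    (fun n y2 => if masiv.contains y2 then n + (masiv.count y2 : Int) else n) 0

-- A's outer loop body: 'if n in d.keys(): d[n].append(lbl) else: d[n]=[lbl]'
def aStep (masiv : List Int) (group : Int) (d : PySem.Dict Int (List String)) (y : Int) :
    PySem.Dict Int (List String) :=
  let n := aInner masiv group y
  if d.contains n then d.insert n (d.getD n [] ++ [aLabel group y])
  else d.insert n [aLabel group y]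

-- literal transliteration of A; where Python raises ValueError (min()/max() of an
-- empty sequence, max() of empty d.keys()) the match falls through to a junk
-- value — those inputs are excluded by Pre_.
def get_group_point (masiv : List Int) (group : Int) : Int × List String :=
  match PySem.List.min? masiv (fun x => x), PySem.List.max? masiv (fun x => x) with
  | some mn, some mx =>
    let d := (PySem.List.pyRange mn (mx - group + 2) 1).foldl (aStep masiv group) PySem.Dict.empty
    match PySem.List.max? d.keys (fun x => x) with
    | some m => (m, d.getD m [])   -- d[max(d.keys())]: the max key is present
    | none => (0, [])
  | _, _ => (0, [])

-- ===== PORT B =====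
-- f"{y}-{y+group-1}"
def bLabel (group y : Int) : String :=
  PySem.Int.toStr y ++ "-" ++ PySem.Int.toStr (y + group - 1)

-- 'for v in masiv: cnt[v] = cnt.get(v, 0) + 1'
def bCnt (masiv : List Int) : PySem.Dict Int Int :=
  masiv.foldl (fun c v => c.insert v (c.getD v 0 + 1)) PySem.Dict.empty

-- 'n += cnt.get(v, 0)' (priming loop body)
def bAdd (cnt : PySem.Dict Int Int) (n v : Int) : Int := n + cnt.getD v 0

-- B's main loop body: slide the running sum, then update (best, wins)
def bStep (cnt : PySem.Dict Int Int) (group w : Int)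
    (st : Int × Option Int × List String) (y : Int) : Int × Option Int × List String :=
  let n := st.1 + cnt.getD (y + w - 1) 0 - cnt.getD (y - 1) 0
  match st.2.1 with
  | none => (n, some n, [bLabel group y])
  | some b =>
    if n > b then (n, some n, [bLabel group y])
    else if n = b then (n, some b, st.2.2 ++ [bLabel group y])
    else (n, some b, st.2.2)

-- literal transliteration of Source B (counter dict, primed sliding sum, running best)
def get_group_point_alt (masiv : List Int) (group : Int) : Int × List String :=
  let cnt := bCnt masiv
  match PySem.List.min? masiv (fun x => x) with
  | none => (0, [])
  | some lo =>
    match PySem.List.max? masiv (fun x => x) with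
    | none => (0, [])
    | some hi =>
      let w : Int := max group 0
      let n0 := (PySem.List.pyRange (lo - 1) (lo - 1 + w) 1).foldl (bAdd cnt) 0
      let res := (PySem.List.pyRange lo (hi - group + 2) 1).foldl (bStep cnt group w) (n0, none, [])
      match res.2.1 with
      | some b => (b, res.2.2)
      | none => (0, [])   -- best is None: no window at all; A raises here (outside Pre_)

-- ===== PRECONDITION & SPEC =====
-- Pre_ excludes exactly the inputs where Python A raises ValueError: the empty
-- list (min/max of an empty sequence) and group > max-min+1 (max of an empty
-- dict-keys sequence).
def Pre_get_group_point (masiv : List Int) (group : Int) : Prop :=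
  masiv ≠ [] ∧ group ≤ (PySem.List.max? masiv (fun x => x)).getD 0 - (PySem.List.min? masiv (fun x => x)).getD 0 + 1
instance (masiv : List Int) (group : Int) : Decidable (Pre_get_group_point masiv group) := by unfold Pre_get_group_point; infer_instance
def pvWitness_get_group_point : List Int × Int := ([1, 2, 2, 5], 2)
def Spec_get_group_point (masiv : List Int) (group : Int) (out : Int × List String) : Prop := out = get_group_point_alt masiv group
instance (masiv : List Int) (group : Int) (out : Int × List String) : Decidable (Spec_get_group_point masiv group out) := by unfold Spec_get_group_point; infer_instance

-- ===== CLAIM (what is proved, stated in full; the proofs are below) =====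
def Claim_equal_get_group_point : Prop := ∀ (masiv : List Int) (group : Int), Dom_get_group_point masiv group → Pre_get_group_point masiv group → Spec_get_group_point masiv group (get_group_point masiv group)

-- ===== LEMMAS AND PROOFS =====

-- the window label, proof-side copy of aLabel/bLabel
def pyLabel (group y : Int) : String :=
  PySem.Int.toStr y ++ "-" ++ PySem.Int.toStr (y + group - 1)

theorem aLabel_eq : @aLabel = @pyLabel := rfl
theorem bLabel_eq : @bLabel = @pyLabel := rfl

-- number of elements of masiv in the window [y, y+w)
def winSum (masiv : List Int) (w y : Int) : Int :=
  ((PySem.List.pyRange y (y + w) 1).map (fun v => (masiv.count v : Int))).sum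

-- B's running-best step on a (count, label) pair
def bstep (st : Option Int × List String) (p : Int × String) : Option Int × List String :=
  match st.1 with
  | none => (some p.1, [p.2])
  | some b => if p.1 > b then (some p.1, [p.2])
              else if p.1 = b then (some b, st.2 ++ [p.2])
              else (some b, st.2)

-- B's loop body with the counter lookups replaced by List.count
def tstep (masiv : List Int) (group : Int) (st : Int × Option Int × List String) (y : Int) :
    Int × Option Int × List String :=
  (st.1 + (masiv.count (y + max group 0 - 1) : Int) - (masiv.count (y - 1) : Int),
   bstep st.2 (st.1 + (masiv.count (y + max group 0 - 1) : Int) - (masiv.count (y - 1) : Int), pyLabel group y))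

-- the (count, label) stream both programs process
def winPairs (masiv : List Int) (group mn : Int) (N : Nat) : List (Int × String) :=
  (List.range N).map (fun k : Nat => (winSum masiv (max group 0) (mn + (k : Int)), pyLabel group (mn + (k : Int))))

theorem cntD (masiv : List Int) (v : Int) : (bCnt masiv).getD v 0 = (masiv.count v : Int) := by
  unfold bCnt
  rw [PySem.Dict.getD_foldl_insert_add_one, PySem.Dict.getD_empty]
  simp [List.count]

theorem winSum_slide (masiv : List Int) (w y : Int) (hw : 0 ≤ w) :
    winSum masiv w y = winSum masiv w (y - 1) + (masiv.count (y + w - 1) : Int) - (masiv.count (y - 1) : Int) := by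
  rcases eq_or_lt_of_le hw with h0 | h1
  · unfold winSum
    rw [← h0]
    rw [PySem.List.pyRange_one_eq_nil (by omega), PySem.List.pyRange_one_eq_nil (by omega)]
    simp
  · have hcons := PySem.List.pyRange_one_cons (a := y - 1) (b := y - 1 + w) (by omega)
    have e : y - 1 + 1 = y := by ring
    have e1 : y - 1 + w = y + w - 1 := by ring
    rw [e, e1] at hcons
    have happ := PySem.List.pyRange_one_succ_right (a := y) (b := y + w - 1) (by omega)
    have e2 : y + w - 1 + 1 = y + w := by ring
    rw [e2] at happ
    unfold winSum
    rw [happ, e1, hcons]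
    simp
    ring

set_option maxRecDepth 4096 in
theorem bstep_fold (L : List (Int × String)) : ∀ (b : Int) (ws : List String),
    L.foldl bstep (some b, ws) =
      (some (L.foldl (fun m p => max m p.1) b),
       (if b = L.foldl (fun m p => max m p.1) b then ws else []) ++
         (L.filter (fun p => p.1 = L.foldl (fun m p => max m p.1) b)).map (·.2)) := by
  induction L with
  | nil => intro b ws; simp
  | cons p t ih =>
    intro b ws
    have hub : ∀ (c : Int), c ≤ t.foldl (fun m p => max m p.1) c :=
      fun c => (PySem.List.le_foldl_max_int t (·.1) c).1
    simp only [List.foldl_cons, List.filter_cons]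
    rcases lt_trichotomy b p.1 with hlt | heq | hgt
    · have hb : bstep (some b, ws) p = (some p.1, [p.2]) := by
        simp only [bstep]; rw [if_pos (by omega)]
      have hm : max b p.1 = p.1 := by omega
      rw [hb, ih]
      simp only [hm]
      have hbm : ¬ (b = t.foldl (fun m p => max m p.1) p.1) := by
        have := hub p.1; omega
      by_cases hpm : p.1 = t.foldl (fun m p => max m p.1) p.1
      · rw [if_pos hpm, if_neg hbm, if_pos (decide_eq_true hpm)]
        simp
      · rw [if_neg hpm, if_neg hbm]; rw [if_neg (by exact fun hc => hpm (of_decide_eq_true hc))]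
    · have hb : bstep (some b, ws) p = (some b, ws ++ [p.2]) := by
        simp only [bstep]; rw [if_neg (by omega), if_pos (by omega)]
      have hm : max b p.1 = b := by omega
      rw [hb, ih]
      simp only [hm]
      by_cases hbm : b = t.foldl (fun m p => max m p.1) b
      · rw [if_pos hbm]; rw [if_pos hbm]; rw [if_pos (decide_eq_true (heq.symm.trans hbm))]
        simp
      · have hpm : ¬ (p.1 = t.foldl (fun m p => max m p.1) b) :=
          fun h => hbm (heq.trans h)
        rw [if_neg hbm]; rw [if_neg hbm]; rw [if_neg (by exact fun hc => hpm (of_decide_eq_true hc))]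
    · have hb : bstep (some b, ws) p = (some b, ws) := by
        simp only [bstep]; rw [if_neg (by omega), if_neg (by omega)]
      have hm : max b p.1 = b := by omega
      rw [hb, ih]
      simp only [hm]
      have hpm : ¬ (p.1 = t.foldl (fun m p => max m p.1) b) := by
        have := hub b; omega
      by_cases hbm : b = t.foldl (fun m p => max m p.1) b
      · rw [if_pos hbm]; rw [if_neg (by exact fun hc => hpm (of_decide_eq_true hc))]
      · rw [if_neg hbm]; rw [if_neg (by exact fun hc => hpm (of_decide_eq_true hc))]

-- A's inner loop computes the window count
theorem innerA (masiv : List Int) (group y : Int) :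
    aInner masiv group y = winSum masiv (max group 0) y := by
  unfold aInner
  have hfun : (fun (n : Int) (y2 : Int) => if masiv.contains y2 then n + (masiv.count y2 : Int) else n)
      = (fun n y2 => n + (masiv.count y2 : Int)) := by
    funext n y2
    by_cases hc : masiv.contains y2
    · rw [if_pos hc]
    · rw [if_neg hc]
      have h0 : masiv.count y2 = 0 :=
        List.count_eq_zero.mpr (fun hm => hc (List.contains_iff_mem.mpr hm))
      simp [h0]
  rw [hfun, PySem.List.foldl_add]
  unfold winSum
  rcases le_or_gt group 0 with h | h
  · have hm : max group 0 = 0 := max_eq_right h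
    rw [hm, PySem.List.pyRange_one_eq_nil (by omega), PySem.List.pyRange_one_eq_nil (by omega)]
    simp
  · have hm : max group 0 = group := max_eq_left (le_of_lt h)
    rw [hm]
    simp

-- A's loop body is the modify-based grouping step on the (count, label) pair
theorem aStep_eq (masiv : List Int) (group : Int) :
    aStep masiv group = fun d y =>
      PySem.Dict.modify d (winSum masiv (max group 0) y) [] (· ++ [pyLabel group y]) := by
  funext d y
  unfold aStep
  rw [innerA, aLabel_eq]
  simp only []
  cases hc : d.contains (winSum masiv (max group 0) y) with
  | true =>
    rw [if_pos rfl]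
    rfl
  | false =>
    rw [if_neg (by simp)]
    show _ = d.insert _ (d.getD _ [] ++ _)
    rw [PySem.Dict.getD_of_not_contains d [] hc]
    rfl

-- B's loop body, with the counter resolved, is tstep
theorem bStep_eq (masiv : List Int) (group : Int) :
    bStep (bCnt masiv) group (max group 0) = tstep masiv group := by
  funext st y
  unfold bStep tstep
  rw [bLabel_eq]
  simp only [cntD]
  rcases st with ⟨n, best, wins⟩
  cases best with
  | none => simp [bstep]
  | some b =>
    simp only [bstep]
    split_ifs <;> rfl

-- B's sliding loop tracks the window count and feeds the best-tracking step
theorem Btriple (masiv : List Int) (group : Int) (N : Nat) (a : Int) (st : Option Int × List String) :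
    ((List.range N).map (fun k : Nat => a + (k : Int))).foldl (tstep masiv group)
        (winSum masiv (max group 0) (a - 1), st)
      = (winSum masiv (max group 0) (a + N - 1), (winPairs masiv group a N).foldl bstep st) := by
  induction N with
  | zero => simp [winPairs]
  | succ n ih =>
    rw [List.range_succ]
    unfold winPairs
    rw [List.range_succ]
    simp only [List.map_append, List.foldl_append, List.map_cons, List.map_nil,
      List.foldl_cons, List.foldl_nil]
    rw [ih]
    unfold winPairs at ih
    have hslide : winSum masiv (max group 0) (a + n - 1) +
          (masiv.count (a + n + max group 0 - 1) : Int) - (masiv.count (a + n - 1) : Int)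
        = winSum masiv (max group 0) (a + n) := by
      have := winSum_slide masiv (max group 0) (a + n) (le_max_right _ _)
      rw [this]
    show (winSum masiv (max group 0) (a + ↑n - 1) +
        (masiv.count (a + ↑n + max group 0 - 1) : Int) - (masiv.count (a + ↑n - 1) : Int),
        bstep ((winPairs masiv group a n).foldl bstep st)
          (winSum masiv (max group 0) (a + ↑n - 1) +
            (masiv.count (a + ↑n + max group 0 - 1) : Int) - (masiv.count (a + ↑n - 1) : Int),
            pyLabel group (a + ↑n)))
      = (winSum masiv (max group 0) (a + ↑(n + 1) - 1),
          bstep ((winPairs masiv group a n).foldl bstep st)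
            (winSum masiv (max group 0) (a + ↑n), pyLabel group (a + ↑n)))
    rw [hslide]
    have hc : a + ((n : Int) + 1) - 1 = a + (n : Int) := by ring
    push_cast
    rw [hc]

-- canonical form of A's result
theorem A_canon (masiv : List Int) (group mn mx : Int)
    (hmn : PySem.List.min? masiv (fun x => x) = some mn)
    (hmx : PySem.List.max? masiv (fun x => x) = some mx)
    (p : Int × String) (t : List (Int × String))
    (hL : winPairs masiv group mn ((mx - group + 2 - mn).toNat) = p :: t) :
    get_group_point masiv group =
      (t.foldl (fun m q => max m q.1) p.1,
       ((p :: t).filter (fun q => q.1 == t.foldl (fun m q => max m q.1) p.1)).map (·.2)) := by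
  unfold get_group_point
  rw [hmn, hmx]
  show (let d := (PySem.List.pyRange mn (mx - group + 2) 1).foldl (aStep masiv group) PySem.Dict.empty
        match PySem.List.max? d.keys (fun x => x) with
        | some m => (m, d.getD m [])
        | none => (0, [])) = _
  rw [aStep_eq]
  have hd : (PySem.List.pyRange mn (mx - group + 2) 1).foldl
        (fun d y => PySem.Dict.modify d (winSum masiv (max group 0) y) [] (· ++ [pyLabel group y]))
        PySem.Dict.empty
      = (winPairs masiv group mn ((mx - group + 2 - mn).toNat)).foldl
        (fun d q => PySem.Dict.modify d q.1 [] (fun x => x ++ [q.2])) PySem.Dict.empty := by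
    rw [PySem.List.pyRange_one]
    unfold winPairs
    rw [List.foldl_map, List.foldl_map]
  rw [hd]
  set L := winPairs masiv group mn ((mx - group + 2 - mn).toNat) with hLdef
  set D := L.foldl (fun d q => PySem.Dict.modify d q.1 [] (fun x => x ++ [q.2])) PySem.Dict.empty with hDdef
  have hkeys : D.keys = PySem.Set.ofList (L.map (·.1)) := by
    rw [hDdef, PySem.Dict.keys_foldl_modify_key L (·.1) [] (fun _ q => fun x => x ++ [q.2]) PySem.Dict.empty]
    rw [PySem.Dict.keys_empty, PySem.Set.update_nil_left]
  have hmem_p : p.1 ∈ L.map (·.1) := by rw [hL]; simp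
  show (match PySem.List.max? D.keys (fun x => x) with
        | some m => (m, D.getD m [])
        | none => (0, [])) = _
  cases hM : PySem.List.max? D.keys (fun x => x) with
  | none =>
    exfalso
    have hkeysnil : D.keys = [] := (PySem.List.max?_eq_none_iff _ _).mp hM
    have : p.1 ∈ D.keys := by
      rw [hkeys]; exact (PySem.Set.mem_ofList _ _).mpr hmem_p
    rw [hkeysnil] at this
    simp at this
  | some MA =>
    show (MA, D.getD MA []) = _
    have hMv : t.foldl (fun m q => max m q.1) p.1 = (t.map (·.1)).foldl max p.1 := by
      rw [List.foldl_map]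
    have hMv_mem : t.foldl (fun m q => max m q.1) p.1 ∈ L.map (·.1) := by
      rw [hL, hMv]
      rcases PySem.List.foldl_max_mem (t.map (·.1)) p.1 with h | h
      · rw [h]; simp
      · simp only [List.map_cons, List.mem_cons]
        exact Or.inr h
    have h2 : t.foldl (fun m q => max m q.1) p.1 ≤ MA := by
      have hisMax := PySem.List.max?_isMax hM
      exact hisMax _ (by rw [hkeys]; exact (PySem.Set.mem_ofList _ _).mpr hMv_mem)
    have h1 : MA ≤ t.foldl (fun m q => max m q.1) p.1 := by
      have hMA_mem : MA ∈ L.map (·.1) := by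
        have := PySem.List.max?_mem hM
        rw [hkeys] at this
        exact (PySem.Set.mem_ofList _ _).mp this
      rw [hL] at hMA_mem
      simp only [List.map_cons, List.mem_cons] at hMA_mem
      rw [hMv]
      rcases hMA_mem with h | h
      · rw [h]; exact (PySem.List.le_foldl_max _ _).1
      · exact (PySem.List.le_foldl_max _ _).2 MA h
    have hMA : MA = t.foldl (fun m q => max m q.1) p.1 := le_antisymm h1 h2
    have hg : D.getD MA [] = (L.filter (fun q => q.1 == MA)).map (·.2) := by
      rw [hDdef, PySem.Dict.getD_foldl_modify_append]
      simp
    rw [hg, hMA, hL]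

-- canonical form of B's result
theorem B_canon (masiv : List Int) (group mn mx : Int)
    (hmn : PySem.List.min? masiv (fun x => x) = some mn)
    (hmx : PySem.List.max? masiv (fun x => x) = some mx)
    (p : Int × String) (t : List (Int × String))
    (hL : winPairs masiv group mn ((mx - group + 2 - mn).toNat) = p :: t) :
    get_group_point_alt masiv group =
      (t.foldl (fun m q => max m q.1) p.1,
       (if p.1 = t.foldl (fun m q => max m q.1) p.1 then [p.2] else []) ++
         (t.filter (fun q => q.1 = t.foldl (fun m q => max m q.1) p.1)).map (·.2)) := by
  unfold get_group_point_alt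
  rw [hmn, hmx]
  have hn0 : (PySem.List.pyRange (mn - 1) (mn - 1 + max group 0) 1).foldl (bAdd (bCnt masiv)) 0
      = winSum masiv (max group 0) (mn - 1) := by
    unfold bAdd
    simp only [cntD]
    rw [PySem.List.foldl_add]
    unfold winSum
    simp
  have hres : (PySem.List.pyRange mn (mx - group + 2) 1).foldl
        (bStep (bCnt masiv) group (max group 0))
        ((PySem.List.pyRange (mn - 1) (mn - 1 + max group 0) 1).foldl (bAdd (bCnt masiv)) 0, none, [])
      = (winSum masiv (max group 0) (mn + ((mx - group + 2 - mn).toNat : Int) - 1),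
         (winPairs masiv group mn ((mx - group + 2 - mn).toNat)).foldl bstep (none, [])) := by
    rw [hn0, bStep_eq, PySem.List.pyRange_one]
    exact Btriple masiv group _ mn (none, [])
  show (match ((PySem.List.pyRange mn (mx - group + 2) 1).foldl
        (bStep (bCnt masiv) group (max group 0))
        ((PySem.List.pyRange (mn - 1) (mn - 1 + max group 0) 1).foldl (bAdd (bCnt masiv)) 0, none, [])).2.1 with
    | some b => (b, ((PySem.List.pyRange mn (mx - group + 2) 1).foldl
        (bStep (bCnt masiv) group (max group 0))
        ((PySem.List.pyRange (mn - 1) (mn - 1 + max group 0) 1).foldl (bAdd (bCnt masiv)) 0, none, [])).2.2)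
    | none => (0, [])) = _
  rw [hres, hL]
  have hcons : bstep (none, ([] : List String)) p = (some p.1, [p.2]) := rfl
  rw [List.foldl_cons, hcons, bstep_fold t p.1 [p.2]]

-- ===== VERDICT (by name: the statement is the Claim_ definition above) =====
theorem get_group_point_spec : Claim_equal_get_group_point := by
  intro masiv group _hdom hpre
  obtain ⟨hne, hgr⟩ := hpre
  unfold Spec_get_group_point
  obtain ⟨mn, hmn⟩ : ∃ mn, PySem.List.min? masiv (fun x => x) = some mn := by
    cases h : PySem.List.min? masiv (fun x => x) with
    | none => exact absurd ((PySem.List.min?_eq_none_iff _ _).mp h) hne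
    | some v => exact ⟨v, rfl⟩
  obtain ⟨mx, hmx⟩ : ∃ mx, PySem.List.max? masiv (fun x => x) = some mx := by
    cases h : PySem.List.max? masiv (fun x => x) with
    | none => exact absurd ((PySem.List.max?_eq_none_iff _ _).mp h) hne
    | some v => exact ⟨v, rfl⟩
  rw [hmn, hmx] at hgr
  simp only [Option.getD_some] at hgr
  have hNpos : 0 < (mx - group + 2 - mn).toNat := by omega
  obtain ⟨p, t, hL⟩ : ∃ p t, winPairs masiv group mn ((mx - group + 2 - mn).toNat) = p :: t := by
    cases hc : winPairs masiv group mn ((mx - group + 2 - mn).toNat) with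
    | nil =>
      exfalso
      have := congrArg List.length hc
      simp [winPairs] at this
      omega
    | cons p t => exact ⟨p, t, rfl⟩
  rw [A_canon masiv group mn mx hmn hmx p t hL, B_canon masiv group mn mx hmn hmx p t hL]
  have hfeq : (fun q : Int × String => q.1 == t.foldl (fun m q => max m q.1) p.1)
      = (fun q : Int × String => decide (q.1 = t.foldl (fun m q => max m q.1) p.1)) := by
    funext q
    by_cases h : q.1 = t.foldl (fun m q => max m q.1) p.1
    · simp [h]
    · simp [h]
  rw [List.filter_cons, hfeq]
  by_cases hpm : p.1 = t.foldl (fun m q => max m q.1) p.1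
  · rw [if_pos (by simpa using hpm), if_pos hpm]
    simp
  · rw [if_neg (by simpa using hpm), if_neg hpm]
    simp
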